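-- pv_equiv track=rewrite | github.com/MK2112/HWR-Berlin-Calendar-Sync | modules/ics_file.py | pretty_print
-- ===== SOURCE A (Python) =====
-- def pretty_print(text):
--    replacements = {
--       "\\,": ", ",
--       "\\;": "; ",
--       "\\n": " # ",
--       "\n": " # "
--    }
--
--    for old, new in replacements.items():
--       text = text.replace(old, new)
--
--    return text
-- ===== SOURCE B (Python) =====
-- def pretty_print(text):
--     # single left-to-right scan instead of four full-string replace passes
--     out = []
--     i = 0
--     n = len(text)
--     while i < n:
--         c = text[i]
--         if c == "\\" and i + 1 < n and text[i + 1] in ",;n":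
--             nxt = text[i + 1]
--             out.append(", " if nxt == "," else "; " if nxt == ";" else " # ")
--             i += 2
--         elif c == "\n":
--             out.append(" # ")
--             i += 1
--         else:
--             out.append(c)
--             i += 1
--     return "".join(out)
-- ===== Notes on version B (the rewrite author's own statement) =====
-- stated objective: alternative
-- what changed: A applies four sequential whole-string str.replace passes (one per dict entry); B makes a single left-to-right scan over the characters, dispatching each escape sequence or newline to its replacement as it goes.
import Mathlib
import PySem

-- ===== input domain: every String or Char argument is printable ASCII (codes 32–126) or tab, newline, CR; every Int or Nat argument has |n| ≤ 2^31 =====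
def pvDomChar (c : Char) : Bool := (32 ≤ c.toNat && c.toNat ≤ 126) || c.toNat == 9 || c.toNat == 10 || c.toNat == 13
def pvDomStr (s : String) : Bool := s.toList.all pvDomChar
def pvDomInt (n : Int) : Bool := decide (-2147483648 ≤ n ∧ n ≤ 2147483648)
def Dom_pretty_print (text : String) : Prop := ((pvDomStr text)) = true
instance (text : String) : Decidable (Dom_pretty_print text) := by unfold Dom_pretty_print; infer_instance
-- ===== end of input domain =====

-- B replaces A's four sequential full-string .replace passes by one left-to-right scan that
-- dispatches on each character (objective: alternative — a single pass of similar cost).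

-- ===== PORT A =====
-- A: a dict of replacements, applied one after the other with str.replace.
def pretty_print (text : String) : String :=
  let replacements : List (String × String) := [("\\,", ", "), ("\\;", "; "), ("\\n", " # "), ("\n", " # ")]
  replacements.foldl (fun t p => PySem.Str.replace t p.1 p.2) text

-- ===== PORT B =====
-- B's scan: at a backslash followed by ',', ';' or 'n' emit the replacement and skip both
-- characters; at a newline emit " # "; otherwise copy the character.
def ppGo : List Char → List Char
  | [] => []
  | '\\' :: ',' :: t => ',' :: ' ' :: ppGo t
  | '\\' :: ';' :: t => ';' :: ' ' :: ppGo t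
  | '\\' :: 'n' :: t => ' ' :: '#' :: ' ' :: ppGo t
  | '\n' :: t => ' ' :: '#' :: ' ' :: ppGo t
  | c :: t => c :: ppGo t

def pretty_print_alt (text : String) : String := String.ofList (ppGo text.toList)

-- ===== PRECONDITION & SPEC =====
def Spec_pretty_print (text : String) (out : String) : Prop := out = pretty_print_alt text
instance (text : String) (out : String) : Decidable (Spec_pretty_print text out) := by unfold Spec_pretty_print; infer_instance

-- ===== CLAIM (what is proved, stated in full; the proofs are below) =====
def Claim_equal_pretty_print : Prop := ∀ (text : String), Dom_pretty_print text → Spec_pretty_print text (pretty_print text)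

-- ===== LEMMAS AND PROOFS =====

-- Unfolding equations for PySem.Chars.replace.go (fuel, worklist, reversed accumulator).
theorem goZero (old new l acc : List Char) : PySem.Chars.replace.go old new 0 l acc = acc.reverse ++ l := rfl

theorem goNil (old new : List Char) (fuel : Nat) (acc : List Char) : PySem.Chars.replace.go old new fuel [] acc = acc.reverse := by
  cases fuel with
  | zero => simp [goZero]
  | succ n => rfl

theorem goCons (old new : List Char) (fuel : Nat) (c : Char) (t acc : List Char) :
    PySem.Chars.replace.go old new (fuel+1) (c::t) acc =
      if old.isPrefixOf (c::t) then PySem.Chars.replace.go old new fuel (List.drop old.length (c::t)) (new.reverse ++ acc)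
      else PySem.Chars.replace.go old new fuel t (c::acc) := rfl

-- The accumulator only prepends: go … acc = acc.reverse ++ go … [].
theorem goAcc (old new : List Char) (fuel : Nat) : ∀ (l acc : List Char),
    PySem.Chars.replace.go old new fuel l acc = acc.reverse ++ PySem.Chars.replace.go old new fuel l [] := by
  induction fuel with
  | zero => intro l acc; simp [goZero]
  | succ n ih =>
    intro l acc
    cases l with
    | nil => simp [goNil]
    | cons c t =>
      rw [goCons, goCons]
      split
      · rw [ih _ (new.reverse ++ acc), ih _ (new.reverse ++ [])]
        simp
      · rw [ih t (c::acc), ih t (c::[])]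
        simp

-- Any fuel at least the worklist length computes the same result (old nonempty).
theorem goFuel (old new : List Char) (hold : old ≠ []) : ∀ (fuel fuel' : Nat) (l acc : List Char),
    l.length ≤ fuel → l.length ≤ fuel' →
    PySem.Chars.replace.go old new fuel l acc = PySem.Chars.replace.go old new fuel' l acc := by
  intro fuel
  induction fuel with
  | zero =>
    intro fuel' l acc h h'
    have : l = [] := List.eq_nil_of_length_eq_zero (Nat.le_zero.mp h)
    subst this; simp [goNil]
  | succ n ih =>
    intro fuel' l acc h h'
    cases l with
    | nil => cases fuel' <;> simp [goNil]
    | cons c t =>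
      cases fuel' with
      | zero => simp at h'
      | succ m =>
        rw [goCons, goCons]
        split
        · rename_i hp
          have hlen : old.length ≥ 1 := List.length_pos_of_ne_nil hold
          have hd : (List.drop old.length (c::t)).length ≤ n := by
            simp [List.length_drop] at *; omega
          have hd' : (List.drop old.length (c::t)).length ≤ m := by
            simp [List.length_drop] at *; omega
          exact ih m _ _ hd hd'
        · have : t.length ≤ n := by simp at h; omega
          have : t.length ≤ m := by simp at h'; omega
          exact ih m t (c::acc) (by simp at h; omega) this

-- Step lemmas for Chars.replace on a nonempty pattern.
theorem repNil (a : Char) (p new : List Char) : PySem.Chars.replace [] (a::p) new = [] := by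
  simp [PySem.Chars.replace, goZero]

theorem repConsNe (a c : Char) (p new t : List Char) (h : c ≠ a) :
    PySem.Chars.replace (c::t) (a::p) new = c :: PySem.Chars.replace t (a::p) new := by
  simp [PySem.Chars.replace, goCons, List.isPrefixOf, Ne.symm h]
  rw [goAcc]
  simp

theorem repSingle (a b c : Char) (new : List Char) :
    PySem.Chars.replace [c] [a,b] new = [c] := by
  have h1 : PySem.Chars.replace [c] [a,b] new = PySem.Chars.replace.go [a,b] new 1 [c] [] := by
    simp [PySem.Chars.replace]
  rw [h1, goCons, if_neg (by simp [List.isPrefixOf]), goZero]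
  rfl

theorem repCons2Ne (a b c : Char) (new t : List Char) (h : c ≠ b) :
    PySem.Chars.replace (a::c::t) [a,b] new = a :: PySem.Chars.replace (c::t) [a,b] new := by
  have h1 : PySem.Chars.replace (a::c::t) [a,b] new = PySem.Chars.replace.go [a,b] new (t.length+2) (a::c::t) [] := by
    simp [PySem.Chars.replace]
  have h2 : PySem.Chars.replace (c::t) [a,b] new = PySem.Chars.replace.go [a,b] new (t.length+1) (c::t) [] := by
    simp [PySem.Chars.replace]
  rw [h1, goCons, if_neg (by simp [List.isPrefixOf, Ne.symm h]), goAcc, h2]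
  simp

theorem repMatch2 (a b : Char) (new t : List Char) :
    PySem.Chars.replace (a::b::t) [a,b] new = new ++ PySem.Chars.replace t [a,b] new := by
  simp [PySem.Chars.replace, goCons, List.isPrefixOf]
  rw [goAcc, goFuel [a,b] new (by simp) (t.length+1) t.length t _ (by simp) (le_refl _)]
  simp

theorem repMatch1 (a : Char) (new t : List Char) :
    PySem.Chars.replace (a::t) [a] new = new ++ PySem.Chars.replace t [a] new := by
  simp [PySem.Chars.replace, goCons, List.isPrefixOf]
  rw [goAcc]
  simp

-- Head of a replace result: the input's head or the replacement's head.
theorem headRep (a b : Char) (new y : List Char) (hnew : new ≠ []) :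
    (PySem.Chars.replace y [a,b] new).head? = y.head? ∨ (PySem.Chars.replace y [a,b] new).head? = new.head? := by
  match y with
  | [] => left; rw [repNil]
  | [c] => left; rw [repSingle]
  | c :: d :: t =>
    by_cases hc : c = a
    · subst hc
      by_cases hd : d = b
      · subst hd
        right; rw [repMatch2]
        cases new with
        | nil => exact absurd rfl hnew
        | cons x xs => simp
      · left; rw [repCons2Ne _ _ _ _ _ hd]; simp
    · left; rw [repConsNe _ _ _ _ _ hc]; simp

theorem repCons2Ne' (a b : Char) (new y : List Char) (h : y.head? ≠ some b) :
    PySem.Chars.replace (a::y) [a,b] new = a :: PySem.Chars.replace y [a,b] new := by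
  cases y with
  | nil => rw [repSingle, repNil]
  | cons e es =>
    have he : e ≠ b := by intro hh; simp [hh] at h
    exact repCons2Ne a b e new es he

-- The four sequential replaces of A equal B's single scan.
theorem chainEq : ∀ (n : Nat) (l : List Char), l.length ≤ n →
    PySem.Chars.replace (PySem.Chars.replace (PySem.Chars.replace (PySem.Chars.replace l ['\\',','] [',',' ']) ['\\',';'] [';',' ']) ['\\','n'] [' ','#',' ']) ['\n'] [' ','#',' '] = ppGo l := by
  intro n
  induction n with
  | zero =>
    intro l h
    have : l = [] := List.eq_nil_of_length_eq_zero (Nat.le_zero.mp h)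
    subst this
    simp [repNil, ppGo]
  | succ n ih =>
    intro l h
    cases l with
    | nil => simp [repNil, ppGo]
    | cons c t =>
      by_cases hc : c = '\\'
      · subst hc
        cases t with
        | nil =>
          rw [repSingle, repSingle, repSingle, repConsNe '\n' '\\' [] [' ','#',' '] [] (by decide), repNil]
          simp [ppGo]
        | cons d r =>
          by_cases hd1 : d = ','
          · subst hd1
            rw [repMatch2 '\\' ',' [',',' '] r]
            simp only [List.cons_append, List.nil_append]
            rw [repConsNe '\\' ',' [';'] [';',' '] _ (by decide), repConsNe '\\' ' ' [';'] [';',' '] _ (by decide)]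
            rw [repConsNe '\\' ',' ['n'] [' ','#',' '] _ (by decide), repConsNe '\\' ' ' ['n'] [' ','#',' '] _ (by decide)]
            rw [repConsNe '\n' ',' [] [' ','#',' '] _ (by decide), repConsNe '\n' ' ' [] [' ','#',' '] _ (by decide)]
            rw [ih r (by simp at h; omega)]
            simp [ppGo]
          · by_cases hd2 : d = ';'
            · subst hd2
              rw [repCons2Ne '\\' ',' ';' [',',' '] r (by decide), repConsNe '\\' ';' [','] [',',' '] r (by decide)]
              rw [repMatch2 '\\' ';' [';',' '] _]
              simp only [List.cons_append, List.nil_append]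
              rw [repConsNe '\\' ';' ['n'] [' ','#',' '] _ (by decide), repConsNe '\\' ' ' ['n'] [' ','#',' '] _ (by decide)]
              rw [repConsNe '\n' ';' [] [' ','#',' '] _ (by decide), repConsNe '\n' ' ' [] [' ','#',' '] _ (by decide)]
              rw [ih r (by simp at h; omega)]
              simp [ppGo]
            · by_cases hd3 : d = 'n'
              · subst hd3
                rw [repCons2Ne '\\' ',' 'n' [',',' '] r (by decide), repConsNe '\\' 'n' [','] [',',' '] r (by decide)]
                rw [repCons2Ne '\\' ';' 'n' [';',' '] _ (by decide), repConsNe '\\' 'n' [';'] [';',' '] _ (by decide)]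
                rw [repMatch2 '\\' 'n' [' ','#',' '] _]
                simp only [List.cons_append, List.nil_append]
                rw [repConsNe '\n' ' ' [] [' ','#',' '] _ (by decide), repConsNe '\n' '#' [] [' ','#',' '] _ (by decide),
                    repConsNe '\n' ' ' [] [' ','#',' '] _ (by decide)]
                rw [ih r (by simp at h; omega)]
                simp [ppGo]
              · -- backslash followed by a character that is not ',', ';' or 'n'
                rw [repCons2Ne '\\' ',' d [',',' '] r hd1]
                have h1 : (PySem.Chars.replace (d::r) ['\\',','] [',',' ']).head? ≠ some ';' := by
                  rcases headRep '\\' ',' [',',' '] (d::r) (by simp) with hh | hh <;> rw [hh] <;> simp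
                  exact hd2
                rw [repCons2Ne' '\\' ';' [';',' '] _ h1]
                have h2 : (PySem.Chars.replace (PySem.Chars.replace (d::r) ['\\',','] [',',' ']) ['\\',';'] [';',' ']).head? ≠ some 'n' := by
                  rcases headRep '\\' ';' [';',' '] (PySem.Chars.replace (d::r) ['\\',','] [',',' ']) (by simp) with hh | hh <;> rw [hh]
                  · rcases headRep '\\' ',' [',',' '] (d::r) (by simp) with hh2 | hh2 <;> rw [hh2] <;> simp
                    exact hd3
                  · simp
                rw [repCons2Ne' '\\' 'n' [' ','#',' '] _ h2]
                rw [repConsNe '\n' '\\' [] [' ','#',' '] _ (by decide)]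
                rw [ih (d::r) (by simp at h ⊢; omega)]
                simp [ppGo, hd1, hd2, hd3]
      · by_cases hn : c = '\n'
        · subst hn
          rw [repConsNe '\\' '\n' [','] [',',' '] t (by decide), repConsNe '\\' '\n' [';'] [';',' '] _ (by decide),
              repConsNe '\\' '\n' ['n'] [' ','#',' '] _ (by decide)]
          rw [repMatch1 '\n' [' ','#',' '] _]
          simp only [List.cons_append, List.nil_append]
          rw [ih t (by simp at h; omega)]
          simp [ppGo]
        · rw [repConsNe '\\' c [','] [',',' '] t hc, repConsNe '\\' c [';'] [';',' '] _ hc,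
              repConsNe '\\' c ['n'] [' ','#',' '] _ hc, repConsNe '\n' c [] [' ','#',' '] _ hn]
          rw [ih t (by simp at h; omega)]
          simp [ppGo, hc]

-- ===== VERDICT (by name: the statement is the Claim_ definition above) =====
theorem pretty_print_spec : Claim_equal_pretty_print := by
  intro text _
  unfold Spec_pretty_print
  simp only [pretty_print, pretty_print_alt, List.foldl, PySem.Str.replace, String.toList_ofList]
  exact congrArg String.ofList (chainEq text.toList.length text.toList (le_refl _))
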